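-- pv_equiv track=rewrite | github.com/yashanand1910/solutions | algomonster/miscellaneous/word_search_2.py | word_search_ii
-- ===== SOURCE A (Python) =====
-- from typing import List
--
-- class Trie:
--     def __init__(self, val):
--         self.val = val
--         self.next = {}
--         self.word = -1
--
--     def insert(self, s, index, i=0):
--         if i == len(s):
--             self.word = index
--             return
--         self.next.setdefault(s[i], Trie(s[i]))
--         self.next[s[i]].insert(s, index, i+1)
--
-- def get_directions(matrix, i, j):
--     if i == -1:
--         yield 0, 0
--         return
--     h = len(matrix)
--     w = len(matrix[0])
--     moves = [(i+1, j), (i, j+1), (i-1, j), (i, j-1)]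
--     for x, y in moves:
--         if 0 <= x < h and  0 <= y < w:
--             yield x, y
--
-- def word_search_ii(matrix: List[str], words: List[str]) -> List[str]:
--     trie = Trie('$')
--     found = []
--     for i, word in enumerate(words):
--         found.append(False)
--         trie.insert(word, i)
--
--     def dfs(matrix, i, j, word, visited, cur):
--         if cur.word >= 0:
--             found[cur.word] = True
--             cur.word = -1
--         for x, y in get_directions(matrix, i, j):
--             if not visited[x][y] and matrix[x][y] in cur.next:
--                 visited[x][y] = True
--                 dfs(matrix, x, y, word + matrix[x][y], visited, cur.next[matrix[x][y]])
--                 visited[x][y] = False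
--
--     h = len(matrix)
--     w = len(matrix[0])
--     visited = [[False] * w for i in range(h)]
--     for i in range(h):
--         for j in range(w):
--             if matrix[i][j] in trie.next:
--                 visited[i][j] = True
--                 dfs(matrix, i, j, matrix[i][j], visited, trie.next[matrix[i][j]])
--                 visited[i][j] = False
--
--     res = []
--     for i in range(len(found)):
--         if found[i]:
--             res.append(words[i])
--     return res
-- ===== SOURCE B (Python) =====
-- def word_search_ii(matrix, words):
--     h = len(matrix)
--     w = len(matrix[0])
--
--     def exists_path(word):
--         if not word:
--             return False
--         visited = [[False] * w for _ in range(h)]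
--
--         def dfs(x, y, k):
--             if matrix[x][y] != word[k]:
--                 return False
--             if k + 1 == len(word):
--                 return True
--             visited[x][y] = True
--             ok = False
--             for a, b in ((x + 1, y), (x, y + 1), (x - 1, y), (x, y - 1)):
--                 if 0 <= a < h and 0 <= b < w and not visited[a][b] and dfs(a, b, k + 1):
--                     ok = True
--                     break
--             visited[x][y] = False
--             return ok
--
--         return any(dfs(i, j, 0) for i in range(h) for j in range(w))
--
--     last = {}
--     for i, word in enumerate(words):
--         last[word] = i
--     found = [False] * len(words)
--     for word, idx in last.items():
--         if exists_path(word):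
--             found[idx] = True
--     return [words[i] for i in range(len(words)) if found[i]]
-- ===== Notes on version B (the rewrite author's own statement) =====
-- stated objective: alternative
-- what changed: Replaces the shared Trie and the single mutating multi-word DFS (which marks found words by clearing trie nodes) by a last-index dict over the words plus an independent classic single-word backtracking grid DFS with early exit per distinct word.
import Mathlib
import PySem

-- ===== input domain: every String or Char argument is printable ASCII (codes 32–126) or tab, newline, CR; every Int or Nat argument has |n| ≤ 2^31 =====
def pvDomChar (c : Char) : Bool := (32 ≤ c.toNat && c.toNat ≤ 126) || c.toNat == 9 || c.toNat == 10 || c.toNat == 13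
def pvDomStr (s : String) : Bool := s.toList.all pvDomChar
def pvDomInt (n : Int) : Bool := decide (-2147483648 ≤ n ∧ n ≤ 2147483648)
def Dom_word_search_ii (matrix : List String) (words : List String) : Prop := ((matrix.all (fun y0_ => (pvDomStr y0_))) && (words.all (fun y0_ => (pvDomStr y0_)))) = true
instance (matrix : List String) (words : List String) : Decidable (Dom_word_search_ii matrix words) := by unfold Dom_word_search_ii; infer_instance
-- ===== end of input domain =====

-- B drops A's Trie: it deduplicates words through a last-index dict and runs an independent
-- single-word grid DFS (with early exit) per distinct word; same return value on Pre_.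

-- ===== PORT A =====
-- shared low-level grid/visited helpers (both Pythons index matrix[x][y] / visited[x][y]
-- only after the 0 <= x < h, 0 <= y < w bounds check, so the total getters below are exact there)
def gridCell (g : List (List Char)) (x y : Int) : Char := (g.getD x.toNat []).getD y.toNat ' '
def visGet (v : List (List Bool)) (x y : Int) : Bool := (v.getD x.toNat []).getD y.toNat false
def visSet (v : List (List Bool)) (x y : Int) (b : Bool) : List (List Bool) :=
  v.set x.toNat ((v.getD x.toNat []).set y.toNat b)

mutual
inductive PTrie where
  | mk : Int → PChildren → PTrie
inductive PChildren where
  | nil : PChildren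
  | cons : Char → PTrie → PChildren → PChildren
end

def PTrie.word : PTrie → Int
  | .mk w _ => w
def PTrie.children : PTrie → PChildren
  | .mk _ c => c

-- cur.next[c] (first match; Python dict keys are unique)
def childGet? : PChildren → Char → Option PTrie
  | .nil, _ => none
  | .cons c t r, c' => if c' = c then some t else childGet? r c'

-- cur.next[c] = t (overwrite in place, new key appended: Python dict semantics)
def childSet : PChildren → Char → PTrie → PChildren
  | .nil, c, t => .cons c t .nil
  | .cons c0 t0 r, c, t => if c = c0 then .cons c0 t r else .cons c0 t0 (childSet r c t)

-- Trie.insert (the stored node value `val` is never read, so it is not modelled)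
def trieInsert (t : PTrie) (s : List Char) (idx : Int) : PTrie :=
  match s with
  | [] => .mk idx t.children
  | c :: rest =>
      let child := (childGet? t.children c).getD (.mk (-1) .nil)
      .mk t.word (childSet t.children c (trieInsert child rest idx))

-- get_directions(matrix, i, j)
def movesA (g : List (List Char)) (i j : Int) : List (Int × Int) :=
  if i = -1 then [(0, 0)]
  else
    [(i+1, j), (i, j+1), (i-1, j), (i, j-1)].filter
      (fun p => 0 ≤ p.1 ∧ p.1 < (g.length : Int) ∧ 0 ≤ p.2 ∧ p.2 < ((g.headD []).length : Int))

def sumLen (ws : List String) : Nat := ws.foldl (fun a s => a + s.toList.length) 0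

-- dfs(matrix, i, j, word, visited, cur): the trie node is mutated (word cleared) and the found
-- list updated, so the port threads (cur, found); visited is restored on exit, hence passed down.
-- `fuel` only guards termination: the recursion depth is bounded by the trie height.
def dfsA (fuel : Nat) (g : List (List Char)) (i j : Int) (v : List (List Bool))
    (cur : PTrie) (found : List Bool) : PTrie × List Bool :=
  match fuel with
  | 0 => (cur, found)
  | fuel + 1 =>
    let st0 : PTrie × List Bool :=
      if 0 ≤ cur.word then (PTrie.mk (-1) cur.children, found.set cur.word.toNat true)
      else (cur, found)
    (movesA g i j).foldl (fun st p =>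
      if visGet v p.1 p.2 then st
      else
        match childGet? st.1.children (gridCell g p.1 p.2) with
        | some child =>
            let r := dfsA fuel g p.1 p.2 (visSet v p.1 p.2 true) child st.2
            (PTrie.mk st.1.word (childSet st.1.children (gridCell g p.1 p.2) r.1), r.2)
        | none => st) st0

-- the body of the i/j scan loop: 'if matrix[i][j] in trie.next: visited[i][j] = True; dfs(...); visited[i][j] = False'
def scanCell (g : List (List Char)) (v0 : List (List Bool)) (fuel : Nat)
    (st : PTrie × List Bool) (i j : Nat) : PTrie × List Bool :=
  match childGet? st.1.children (gridCell g i j) with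
  | some child =>
      let r := dfsA fuel g i j (visSet v0 i j true) child st.2
      (PTrie.mk st.1.word (childSet st.1.children (gridCell g i j) r.1), r.2)
  | none => st

def word_search_ii (matrix : List String) (words : List String) : List String :=
  let trie := (PySem.List.enumerate words).foldl
      (fun t p => trieInsert t p.2.toList p.1) (PTrie.mk (-1) .nil)
  let found0 := List.replicate words.length false
  let g := matrix.map String.toList
  let h := matrix.length
  let w := (g.headD []).length          -- len(matrix[0]): IndexError on [] — excluded by Pre_
  let v0 := List.replicate h (List.replicate w false)
  let res := (List.range h).foldl (fun st i =>
      (List.range w).foldl (fun (st : PTrie × List Bool) j =>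
        scanCell g v0 (sumLen words + 1) st i j) st) (trie, found0)
  (List.range res.2.length).foldl
    (fun acc i => if res.2.getD i false then acc ++ [words.getD i ""] else acc) []

-- ===== PORT B =====
def movesB (x y : Int) : List (Int × Int) := [(x+1, y), (x, y+1), (x-1, y), (x, y-1)]

-- inner dfs(x, y, k) of B: recursion on the remaining suffix word[k:]
def dfsB (g : List (List Char)) (h w : Int) (x y : Int) (wd : List Char)
    (v : List (List Bool)) : Bool :=
  match wd with
  | [] => false                         -- unreachable: exists_path rejects "" first
  | c :: rest =>
    if gridCell g x y ≠ c then false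
    else if rest = [] then true
    else
      let v' := visSet v x y true
      (movesB x y).any (fun p =>
        (decide (0 ≤ p.1) && decide (p.1 < h) && decide (0 ≤ p.2) && decide (p.2 < w))
          && !visGet v' p.1 p.2 && dfsB g h w p.1 p.2 rest v')

def existsPathB (g : List (List Char)) (h w : Int) (wd : String) : Bool :=
  if wd.toList = [] then false
  else
    let v0 := List.replicate h.toNat (List.replicate w.toNat false)
    (List.range h.toNat).any fun (i : Nat) =>
      (List.range w.toNat).any fun (j : Nat) => dfsB g h w (↑i) (↑j) wd.toList v0

def word_search_ii_alt (matrix : List String) (words : List String) : List String :=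
  let g := matrix.map String.toList
  let h : Int := matrix.length
  let w : Int := (g.headD []).length    -- len(matrix[0]): IndexError on [] — excluded by Pre_
  let last := (PySem.List.enumerate words).foldl
      (fun (d : PySem.Dict String Int) p => d.insert p.2 p.1) PySem.Dict.empty
  let found := last.items.foldl (fun (fd : List Bool) p =>
      if existsPathB g h w p.1 then fd.set p.2.toNat true else fd)
    (List.replicate words.length false)
  (List.range found.length).foldl
    (fun acc i => if found.getD i false then acc ++ [words.getD i ""] else acc) []

-- ===== PRECONDITION & SPEC =====
-- Pre_ excludes exactly the inputs where A raises IndexError: an empty matrix (len(matrix[0]))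
-- and a matrix with some row shorter than the first (the i/j scan indexes matrix[i][j] for all j < w).
def Pre_word_search_ii (matrix : List String) (words : List String) : Prop :=
  matrix ≠ [] ∧ ∀ r ∈ matrix, (matrix.headD "").toList.length ≤ r.toList.length

instance (matrix : List String) (words : List String) : Decidable (Pre_word_search_ii matrix words) := by
  unfold Pre_word_search_ii; infer_instance

def pvWitness_word_search_ii : List String × List String := (["ab", "ba"], ["ab", "bb", "ab", "", "aba"])

def Spec_word_search_ii (matrix : List String) (words : List String) (out : List String) : Prop := out = word_search_ii_alt matrix words
instance (matrix : List String) (words : List String) (out : List String) : Decidable (Spec_word_search_ii matrix words out) := by unfold Spec_word_search_ii; infer_instance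

-- ===== CLAIM (what is proved, stated in full; the proofs are below) =====
def Claim_equal_word_search_ii : Prop := ∀ (matrix : List String) (words : List String), Dom_word_search_ii matrix words → Pre_word_search_ii matrix words → Spec_word_search_ii matrix words (word_search_ii matrix words)

-- ===== LEMMAS AND PROOFS =====

-- word stored at the node reached by descending along s
def wordAt : PTrie → List Char → Option Int
  | t, [] => some t.word
  | t, c :: s =>
    match childGet? t.children c with
    | some c' => wordAt c' s
    | none => none

-- the word of the node at s, visible only while not yet found (≥ 0)
def waPos (t : PTrie) (s : List Char) : Option Int :=
  match wordAt t s with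
  | some k => if 0 ≤ k then some k else none
  | none => none

-- relation between A's mutated trie and the pristine trie t0: same shape, words either equal
-- or cleared to -1 with the corresponding found flag already set
def TrieR (found : List Bool) (t t0 : PTrie) : Prop :=
  ∀ s, wordAt t s = wordAt t0 s ∨
    (wordAt t s = some (-1) ∧ ∃ k : Int, 0 ≤ k ∧ wordAt t0 s = some k ∧ found.getD k.toNat false = true)

-- all word indices in the trie are < n
def WB (t : PTrie) (n : Nat) : Prop :=
  ∀ s k, wordAt t s = some k → 0 ≤ k → k < (n : Int)

def leF (f f' : List Bool) : Prop := ∀ k : Nat, f.getD k false = true → f'.getD k false = true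

-- pure shadow of dfsA: same traversal over the pristine trie, found list only
def dfsP (fuel : Nat) (g : List (List Char)) (i j : Int) (v : List (List Bool))
    (t : PTrie) (found : List Bool) : List Bool :=
  match fuel with
  | 0 => found
  | fuel + 1 =>
    let found := if 0 ≤ t.word then found.set t.word.toNat true else found
    (movesA g i j).foldl (fun fd p =>
      if visGet v p.1 p.2 then fd
      else
        match childGet? t.children (gridCell g p.1 p.2) with
        | some child => dfsP fuel g p.1 p.2 (visSet v p.1 p.2 true) child fd
        | none => fd) found

-- Boolean reachability of index k through the (pristine) trie from (i, j)
def reachT (fuel : Nat) (g : List (List Char)) (t : PTrie) (k : Int) (i j : Int)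
    (v : List (List Bool)) : Bool :=
  match fuel with
  | 0 => false
  | fuel + 1 =>
    (t.word == k) ||
    (movesA g i j).any (fun p =>
      !visGet v p.1 p.2 &&
      (match childGet? t.children (gridCell g p.1 p.2) with
       | some child => reachT fuel g child k p.1 p.2 (visSet v p.1 p.2 true)
       | none => false))

-- the path predicate both searches decide
def PathW (g : List (List Char)) : Int → Int → List Char → List (List Bool) → Prop
  | _, _, [], _ => True
  | i, j, c :: s, v => ∃ p ∈ movesA g i j, visGet v p.1 p.2 = false ∧ gridCell g p.1 p.2 = c ∧
      PathW g p.1 p.2 s (visSet v p.1 p.2 true)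

-- last value recorded for key s by a left fold (proof-side view of both the dict and the trie)
def lastVal (L : List (Int × String)) (test : String → Bool) : Option Int :=
  L.foldl (fun a p => if test p.2 then some p.1 else a) none
-- basic trie lemmas
theorem childGet?_childSet (ch : PChildren) (c : Char) (t : PTrie) (c' : Char) :
    childGet? (childSet ch c t) c' = if c' = c then some t else childGet? ch c' := by
  match ch with
  | .nil => by_cases h : c' = c <;> simp [childSet, childGet?, h]
  | .cons c0 t0 r =>
    by_cases h : c = c0
    · subst h
      by_cases h' : c' = c <;> simp [childSet, childGet?, h']
    · have ih := childGet?_childSet r c t c'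
      by_cases h' : c' = c0
      · subst h'
        have : ¬ c' = c := fun hh => h hh.symm
        simp [childSet, childGet?, h, this]
      · simp [childSet, childGet?, h, h', ih]

theorem wordAt_nil (t : PTrie) : wordAt t [] = some t.word := rfl
theorem wordAt_cons (t : PTrie) (c : Char) (s : List Char) :
    wordAt t (c :: s) = match childGet? t.children c with
      | some u => wordAt u s
      | none => none := by
  cases t; rfl

theorem getD_set_true_self (l : List Bool) (m : Nat) (hm : m < l.length) :
    (l.set m true).getD m false = true := by
  simp [List.getD, List.getElem?_set, hm]

theorem getD_set_true_ne (l : List Bool) (m k : Nat) (h : k ≠ m) :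
    (l.set m true).getD k false = l.getD k false := by
  have : ¬ m = k := fun hh => h hh.symm
  simp [List.getD, List.getElem?_set, this]

theorem set_true_id (l : List Bool) (m : Nat) (h : l.getD m false = true) :
    l.set m true = l := by
  have hm : m < l.length := by
    by_contra hm
    rw [List.getD, List.getElem?_eq_none_iff.mpr (by omega)] at h
    simp at h
  apply List.ext_getElem (by simp)
  intro i h1 h2
  rw [List.getElem_set]
  split
  · next he => subst he; simpa [List.getD, List.getElem?_eq_getElem hm] using h
  · rfl

-- TrieR / leF structural lemmas
theorem leF_set (f : List Bool) (m : Nat) : leF f (f.set m true) := by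
  intro k hk
  by_cases h : k = m
  · subst h
    have hm : k < f.length := by
      by_contra hm
      rw [List.getD, List.getElem?_eq_none_iff.mpr (by omega)] at hk
      simp at hk
    exact getD_set_true_self f k hm
  · rwa [getD_set_true_ne f m k h]

theorem TrieR_refl (f : List Bool) (t : PTrie) : TrieR f t t := fun s => Or.inl rfl

theorem TrieR_mono {f f' : List Bool} {t t0 : PTrie} (hle : leF f f') (h : TrieR f t t0) :
    TrieR f' t t0 := by
  intro s
  rcases h s with h1 | ⟨h1, k, hk0, hk1, hk2⟩
  · exact Or.inl h1
  · exact Or.inr ⟨h1, k, hk0, hk1, hle _ hk2⟩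

theorem TrieR_isSome {f : List Bool} {t t0 : PTrie} (h : TrieR f t t0) (s : List Char) :
    (wordAt t s).isSome = (wordAt t0 s).isSome := by
  rcases h s with h1 | ⟨h1, k, _, hk1, _⟩
  · rw [h1]
  · rw [h1, hk1]; rfl

theorem TrieR_child_none {f : List Bool} {t t0 : PTrie} (h : TrieR f t t0) (c : Char)
    (hc : childGet? t.children c = none) : childGet? t0.children c = none := by
  have := TrieR_isSome h [c]
  rw [wordAt_cons, wordAt_cons, hc] at this
  cases hc0 : childGet? t0.children c with
  | none => rfl
  | some u0 => rw [hc0] at this; cases u0; simp [wordAt] at this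

theorem TrieR_child {f : List Bool} {t t0 : PTrie} (h : TrieR f t t0) (c : Char) {u : PTrie}
    (hc : childGet? t.children c = some u) :
    ∃ u0, childGet? t0.children c = some u0 ∧ TrieR f u u0 := by
  cases hc0 : childGet? t0.children c with
  | none =>
    have := TrieR_isSome h [c]
    rw [wordAt_cons, wordAt_cons, hc, hc0] at this
    cases u; simp [wordAt] at this
  | some u0 =>
    refine ⟨u0, rfl, fun s => ?_⟩
    have hs := h (c :: s)
    rw [wordAt_cons, wordAt_cons, hc, hc0] at hs
    exact hs

theorem wordAt_mk_cons (w0 : Int) (ch : PChildren) (c : Char) (s : List Char) :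
    wordAt (PTrie.mk w0 ch) (c :: s) = match childGet? ch c with
      | some u => wordAt u s | none => none := rfl

theorem TrieR_update {f : List Bool} {t t0 u u0 u' : PTrie} {c : Char}
    (h : TrieR f t t0) (hc : childGet? t.children c = some u)
    (hc0 : childGet? t0.children c = some u0) (hu : TrieR f u' u0) :
    TrieR f (PTrie.mk t.word (childSet t.children c u')) t0 := by
  intro s
  match s with
  | [] =>
    have h0 := h []
    rw [wordAt_nil, wordAt_nil] at h0
    rw [wordAt_nil, wordAt_nil]
    simpa [PTrie.word] using h0
  | c' :: s =>
    rw [wordAt_mk_cons, childGet?_childSet]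
    by_cases he : c' = c
    · subst he
      rw [if_pos rfl]
      have := hu s
      rw [wordAt_cons, hc0]
      simpa using this
    · rw [if_neg he]
      have hs := h (c' :: s)
      rw [wordAt_cons] at hs
      exact hs

theorem WB_child {t : PTrie} {n : Nat} (h : WB t n) {c : Char} {u : PTrie}
    (hc : childGet? t.children c = some u) : WB u n := by
  intro s k hk hk0
  apply h (c :: s) k _ hk0
  rw [wordAt_cons, hc]; exact hk

-- generic fold lemmas
theorem foldl_pres {α β : Type} (F : β → α → β) (P : β → Prop)
    (h : ∀ b a, P b → P (F b a)) : ∀ (ms : List α) (b : β), P b → P (ms.foldl F b) := by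
  intro ms
  induction ms with
  | nil => intro b hb; exact hb
  | cons a ms ih => intro b hb; exact ih _ (h b a hb)

theorem foldl_sim {α β γ : Type} (FA : β → α → β) (FP : γ → α → γ) (R : β → γ → Prop)
    (h : ∀ b c a, R b c → R (FA b a) (FP c a)) :
    ∀ (ms : List α) (b : β) (c : γ), R b c → R (ms.foldl FA b) (ms.foldl FP c) := by
  intro ms
  induction ms with
  | nil => intro b c hb; exact hb
  | cons a ms ih => intro b c hb; exact ih _ _ (h b c a hb)

theorem foldl_getD_or {α : Type} (F : List Bool → α → List Bool) (P : List Bool → Prop)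
    (contrib : α → Bool) (k : Nat)
    (hP : ∀ fd a, P fd → P (F fd a))
    (hF : ∀ fd a, P fd → (F fd a).getD k false = (fd.getD k false || contrib a)) :
    ∀ (ms : List α) (fd : List Bool), P fd →
      (ms.foldl F fd).getD k false = (fd.getD k false || ms.any contrib) := by
  intro ms
  induction ms with
  | nil => intro fd _; simp
  | cons a ms ih =>
    intro fd hfd
    simp only [List.foldl_cons, List.any_cons]
    rw [ih _ (hP fd a hfd), hF fd a hfd, Bool.or_assoc]

theorem dfsP_len (fuel : Nat) (g : List (List Char)) (i j : Int) (v : List (List Bool))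
    (t : PTrie) (found : List Bool) : (dfsP fuel g i j v t found).length = found.length := by
  induction fuel generalizing i j v t found with
  | zero => rfl
  | succ fuel ih =>
    simp only [dfsP]
    have hP := foldl_pres (α := Int × Int)
      (fun fd p =>
        if visGet v p.1 p.2 then fd
        else
          match childGet? t.children (gridCell g p.1 p.2) with
          | some child => dfsP fuel g p.1 p.2 (visSet v p.1 p.2 true) child fd
          | none => fd)
      (fun fd => fd.length = found.length)
      (by
        intro fd p hfd
        dsimp only
        split
        · exact hfd
        · split
          · rw [ih]; exact hfd
          · exact hfd)
      (movesA g i j)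
    split
    · exact hP _ (by simp)
    · exact hP _ rfl

theorem dfsP_mono (fuel : Nat) (g : List (List Char)) (i j : Int) (v : List (List Bool))
    (t : PTrie) (found : List Bool) : leF found (dfsP fuel g i j v t found) := by
  induction fuel generalizing i j v t found with
  | zero => intro k hk; exact hk
  | succ fuel ih =>
    simp only [dfsP]
    have hP := foldl_pres (α := Int × Int)
      (fun fd p =>
        if visGet v p.1 p.2 then fd
        else
          match childGet? t.children (gridCell g p.1 p.2) with
          | some child => dfsP fuel g p.1 p.2 (visSet v p.1 p.2 true) child fd
          | none => fd)
      (fun fd => leF found fd)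
      (by
        intro fd p hfd
        dsimp only
        split
        · exact hfd
        · split
          · intro k hk; exact ih _ _ _ _ _ _ (hfd k hk)
          · exact hfd)
      (movesA g i j)
    split
    · exact hP _ (fun k hk => leF_set found _ k hk)
    · exact hP _ (fun k hk => hk)

theorem wordAt_clear_cons (t : PTrie) (c : Char) (s : List Char) :
    wordAt (PTrie.mk (-1) t.children) (c :: s) = wordAt t (c :: s) := by
  rw [wordAt_mk_cons, wordAt_cons]

theorem dfsA_eq (fuel : Nat) (g : List (List Char)) (i j : Int) (v : List (List Bool))
    {t t0 : PTrie} {found : List Bool} {n : Nat}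
    (hR : TrieR found t t0) (hn : found.length = n) (hWB : WB t0 n) :
    (dfsA fuel g i j v t found).2 = dfsP fuel g i j v t0 found ∧
      TrieR (dfsP fuel g i j v t0 found) (dfsA fuel g i j v t found).1 t0 := by
  induction fuel generalizing i j v t t0 found with
  | zero => exact ⟨rfl, hR⟩
  | succ fuel ih =>
    simp only [dfsA, dfsP]
    -- the marking step
    have hroot := hR []
    rw [wordAt_nil, wordAt_nil] at hroot
    have hmark :
        (if 0 ≤ t.word then (PTrie.mk (-1) t.children, found.set t.word.toNat true)
          else (t, found)).2
          = (if 0 ≤ t0.word then found.set t0.word.toNat true else found) ∧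
        TrieR (if 0 ≤ t0.word then found.set t0.word.toNat true else found)
          (if 0 ≤ t.word then (PTrie.mk (-1) t.children, found.set t.word.toNat true)
            else (t, found)).1 t0 ∧
        (if 0 ≤ t0.word then found.set t0.word.toNat true else found).length = n := by
      rcases hroot with heq | ⟨hm1, k0, hk0, hk1, hk2⟩
      · have heq' : t.word = t0.word := by injection heq
        by_cases hw : 0 ≤ t.word
        · rw [if_pos hw, if_pos (heq' ▸ hw)]
          refine ⟨by rw [heq'], ?_, by simpa using hn⟩
          intro s
          match s with
          | [] =>
            rw [wordAt_nil, wordAt_nil]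
            refine Or.inr ⟨rfl, t0.word, heq' ▸ hw, rfl, ?_⟩
            apply getD_set_true_self
            rw [hn, ← heq']
            have := hWB [] t0.word (wordAt_nil t0) (heq' ▸ hw)
            omega
          | c :: s =>
            rw [wordAt_clear_cons, ← heq']
            exact TrieR_mono (by rw [heq']; exact leF_set found _) hR (c :: s)
        · rw [if_neg hw, if_neg (heq' ▸ hw)]
          exact ⟨rfl, hR, hn⟩
      · have hw : ¬ 0 ≤ t.word := by
          have : t.word = -1 := by injection hm1
          omega
        have hw0 : (0 : Int) ≤ t0.word := by
          have : t0.word = k0 := by injection hk1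
          omega
        rw [if_neg hw, if_pos hw0]
        have hset : found.set t0.word.toNat true = found := by
          apply set_true_id
          have : t0.word = k0 := by injection hk1
          rw [this]; exact hk2
        rw [hset]
        exact ⟨rfl, hR, hn⟩
    set f0 := (if 0 ≤ t0.word then found.set t0.word.toNat true else found) with hf0
    obtain ⟨hm2, hmR, hmlen⟩ := hmark
    -- the fold over the moves
    have hsim := foldl_sim
      (fun (st : PTrie × List Bool) (p : Int × Int) =>
        if visGet v p.1 p.2 then st
        else
          match childGet? st.1.children (gridCell g p.1 p.2) with
          | some child =>
              let r := dfsA fuel g p.1 p.2 (visSet v p.1 p.2 true) child st.2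
              (PTrie.mk st.1.word (childSet st.1.children (gridCell g p.1 p.2) r.1), r.2)
          | none => st)
      (fun (fd : List Bool) (p : Int × Int) =>
        if visGet v p.1 p.2 then fd
        else
          match childGet? t0.children (gridCell g p.1 p.2) with
          | some child => dfsP fuel g p.1 p.2 (visSet v p.1 p.2 true) child fd
          | none => fd)
      (fun st fd => st.2 = fd ∧ TrieR fd st.1 t0 ∧ fd.length = n)
      (by
        intro st fd p hst
        obtain ⟨h1, h2, h3⟩ := hst
        dsimp only
        by_cases hv : visGet v p.1 p.2
        · rw [if_pos hv, if_pos hv]; exact ⟨h1, h2, h3⟩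
        · rw [if_neg hv, if_neg hv]
          cases hc : childGet? st.1.children (gridCell g p.1 p.2) with
          | none =>
            rw [TrieR_child_none h2 _ hc]
            exact ⟨h1, h2, h3⟩
          | some child =>
            obtain ⟨u0, hc0, hcR⟩ := TrieR_child h2 _ hc
            rw [hc0]
            subst h1
            have hrec := ih p.1 p.2 (visSet v p.1 p.2 true) hcR h3 (WB_child hWB hc0)
            refine ⟨hrec.1, ?_, by rw [dfsP_len]; exact h3⟩
            exact TrieR_update
              (TrieR_mono (fun k hk => dfsP_mono fuel g p.1 p.2 _ u0 st.2 k hk) h2)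
              hc hc0 hrec.2)
      (movesA g i j) _ _ ⟨hm2, hmR, hmlen⟩
    exact ⟨hsim.1, hsim.2.1⟩

theorem dfsP_getD (fuel : Nat) (g : List (List Char)) (i j : Int) (v : List (List Bool))
    {t : PTrie} {found : List Bool} {n : Nat} (k : Int)
    (hWB : WB t n) (hn : found.length = n) (hk : 0 ≤ k) :
    (dfsP fuel g i j v t found).getD k.toNat false
      = (found.getD k.toNat false || reachT fuel g t k i j v) := by
  induction fuel generalizing i j v t found with
  | zero => simp [dfsP, reachT]
  | succ fuel ih =>
    simp only [dfsP, reachT]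
    have hmark : (if 0 ≤ t.word then found.set t.word.toNat true else found).getD k.toNat false
        = (found.getD k.toNat false || (t.word == k)) := by
      by_cases hw : 0 ≤ t.word
      · rw [if_pos hw]
        by_cases hkk : k.toNat = t.word.toNat
        · have : t.word = k := by omega
          have hltI := hWB [] t.word (wordAt_nil t) hw
          have hlt : t.word.toNat < found.length := by omega
          rw [hkk, getD_set_true_self _ _ hlt]
          simp [this]
        · rw [getD_set_true_ne _ _ _ hkk]
          have : ¬ t.word = k := by omega
          simp [this]
      · rw [if_neg hw]
        have : ¬ t.word = k := by omega
        simp [this]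
    have hor := foldl_getD_or
      (fun (fd : List Bool) (p : Int × Int) =>
        if visGet v p.1 p.2 then fd
        else
          match childGet? t.children (gridCell g p.1 p.2) with
          | some child => dfsP fuel g p.1 p.2 (visSet v p.1 p.2 true) child fd
          | none => fd)
      (fun fd => fd.length = n)
      (fun p => !visGet v p.1 p.2 &&
        (match childGet? t.children (gridCell g p.1 p.2) with
         | some child => reachT fuel g child k p.1 p.2 (visSet v p.1 p.2 true)
         | none => false))
      k.toNat
      (by
        intro fd p hfd
        dsimp only
        split
        · exact hfd
        · split
          · rw [dfsP_len]; exact hfd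
          · exact hfd)
      (by
        intro fd p hfd
        dsimp only
        by_cases hv : visGet v p.1 p.2
        · simp [hv]
        · rw [if_neg hv]
          cases hc : childGet? t.children (gridCell g p.1 p.2) with
          | none => simp [hv]
          | some child =>
            rw [ih p.1 p.2 (visSet v p.1 p.2 true) (WB_child hWB hc) hfd]
            simp [hv])
      (movesA g i j)
    rw [hor _ (by split <;> simp [hn]), hmark, Bool.or_assoc]

theorem PathW_nil (g : List (List Char)) (i j : Int) (v : List (List Bool)) :
    PathW g i j [] v := trivial

theorem PathW_cons (g : List (List Char)) (i j : Int) (c : Char) (s : List Char)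
    (v : List (List Bool)) :
    PathW g i j (c :: s) v ↔ ∃ p ∈ movesA g i j, visGet v p.1 p.2 = false ∧
      gridCell g p.1 p.2 = c ∧ PathW g p.1 p.2 s (visSet v p.1 p.2 true) := Iff.rfl

theorem reachT_iff (fuel : Nat) (g : List (List Char)) (t : PTrie) (k : Int) (i j : Int)
    (v : List (List Bool)) :
    reachT fuel g t k i j v = true ↔
      ∃ s, s.length + 1 ≤ fuel ∧ wordAt t s = some k ∧ PathW g i j s v := by
  induction fuel generalizing t i j v with
  | zero =>
    constructor
    · intro h; simp [reachT] at h
    · rintro ⟨s, hs, -, -⟩; omega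
  | succ fuel ih =>
    simp only [reachT, Bool.or_eq_true, List.any_eq_true, Bool.and_eq_true, beq_iff_eq]
    constructor
    · rintro (hw | ⟨p, hp, hv, hm⟩)
      · exact ⟨[], by simp, by rw [wordAt_nil, hw], PathW_nil g i j v⟩
      · cases hc : childGet? t.children (gridCell g p.1 p.2) with
        | none => rw [hc] at hm; simp at hm
        | some child =>
          rw [hc] at hm
          obtain ⟨s', hlen, hw', hp'⟩ := (ih child p.1 p.2 _).mp hm
          refine ⟨gridCell g p.1 p.2 :: s', by simp at hlen ⊢; omega, ?_, ?_⟩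
          · rw [wordAt_cons, hc]; exact hw'
          · exact (PathW_cons g i j _ s' v).mpr
              ⟨p, hp, by simpa using hv, rfl, hp'⟩
    · rintro ⟨s, hlen, hw, hp⟩
      match s with
      | [] =>
        rw [wordAt_nil] at hw
        exact Or.inl (by injection hw)
      | c :: s' =>
        obtain ⟨p, hpm, hv, hcell, hp'⟩ := (PathW_cons g i j c s' v).mp hp
        right
        subst hcell
        rw [wordAt_cons] at hw
        cases hc : childGet? t.children (gridCell g p.1 p.2) with
        | none => rw [hc] at hw; simp at hw
        | some child =>
          rw [hc] at hw
          refine ⟨p, hpm, by simpa using hv, ?_⟩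
          rw [hc]
          exact (ih child p.1 p.2 _).mpr ⟨s', by simp at hlen; omega, hw, hp'⟩

theorem mem_movesA (g : List (List Char)) {i : Int} (j : Int) (hi : 0 ≤ i) (p : Int × Int) :
    p ∈ movesA g i j ↔ p ∈ movesB i j ∧ 0 ≤ p.1 ∧ p.1 < (g.length : Int) ∧ 0 ≤ p.2 ∧
      p.2 < ((g.headD []).length : Int) := by
  unfold movesA movesB
  rw [if_neg (by omega)]
  simp only [List.mem_filter, decide_eq_true_eq]

theorem dfsB_iff (g : List (List Char)) (h w : Int) (hh : h = (g.length : Int))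
    (hw : w = ((g.headD []).length : Int)) :
    ∀ (s : List Char) (c : Char) (x y : Int) (v : List (List Bool)), 0 ≤ x →
      (dfsB g h w x y (c :: s) v = true ↔
        gridCell g x y = c ∧ PathW g x y s (visSet v x y true)) := by
  intro s
  induction s with
  | nil =>
    intro c x y v hx
    simp only [dfsB]
    by_cases hc : gridCell g x y = c
    · simp [hc, PathW_nil]
    · simp [hc]
  | cons c' s'' ih =>
    intro c x y v hx
    simp only [dfsB]
    by_cases hc : gridCell g x y = c
    · rw [if_neg (by simp [hc]), if_neg (by simp)]
      simp only [List.any_eq_true, Bool.and_eq_true, Bool.not_eq_true', decide_eq_true_eq]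
      constructor
      · rintro ⟨p, hp, ⟨⟨⟨⟨h1, h2⟩, h3⟩, h4⟩, h5⟩, h6⟩
        refine ⟨hc, ?_⟩
        rw [PathW_cons]
        obtain ⟨hcell, hpath⟩ := (ih c' p.1 p.2 _ h1).mp h6
        exact ⟨p, (mem_movesA g y hx p).mpr ⟨hp, h1, hh ▸ h2, h3, hw ▸ h4⟩, h5, hcell, hpath⟩
      · rintro ⟨-, hpath⟩
        rw [PathW_cons] at hpath
        obtain ⟨p, hpm, hv, hcell, hpath⟩ := hpath
        obtain ⟨hp, h1, h2, h3, h4⟩ := (mem_movesA g y hx p).mp hpm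
        refine ⟨p, hp, ?_⟩
        have : dfsB g h w p.1 p.2 (c' :: s'') (visSet v x y true) = true :=
          (ih c' p.1 p.2 _ h1).mpr ⟨hcell, hpath⟩
        exact ⟨⟨⟨⟨⟨h1, by omega⟩, h3⟩, by omega⟩, hv⟩, this⟩
    · rw [if_pos (by simp [hc])]
      simp [hc]

theorem wordAt_default_getD (s : List Char) :
    (wordAt (PTrie.mk (-1) PChildren.nil) s).getD (-1) = -1 := by
  cases s with
  | nil => rfl
  | cons c s => rw [wordAt_mk_cons]; simp [childGet?]

theorem wordAt_trieInsert (u : List Char) : ∀ (t : PTrie) (idx : Int) (s : List Char),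
    wordAt (trieInsert t u idx) s =
      if s = u then some idx
      else if s <+: u then some ((wordAt t s).getD (-1))
      else wordAt t s := by
  induction u with
  | nil =>
    intro t idx s
    match s with
    | [] => simp [trieInsert, wordAt_nil, PTrie.word]
    | c :: s' =>
      rw [if_neg (by simp), if_neg (by simp)]
      show wordAt (PTrie.mk idx t.children) (c :: s') = _
      rw [wordAt_mk_cons, wordAt_cons]
  | cons c0 u' ih =>
    intro t idx s
    match s with
    | [] =>
      rw [if_neg (by simp), if_pos (List.nil_prefix)]
      simp [trieInsert, wordAt_nil, PTrie.word]
    | c :: s' =>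
      show wordAt (PTrie.mk t.word (childSet t.children c0
        (trieInsert ((childGet? t.children c0).getD (PTrie.mk (-1) PChildren.nil)) u' idx))) (c :: s') = _
      rw [wordAt_mk_cons, childGet?_childSet]
      by_cases hc : c = c0
      · subst hc
        rw [if_pos rfl]
        dsimp only
        rw [ih _ idx s']
        by_cases h1 : s' = u'
        · rw [if_pos h1, if_pos (by rw [h1])]
        · rw [if_neg h1]
          have hne : ¬(c :: s' = c :: u') := by intro h; injection h with _ hh; exact h1 hh
          by_cases h2 : s' <+: u'
          · rw [if_pos h2, if_neg hne, if_pos (by rw [List.cons_prefix_cons]; exact ⟨rfl, h2⟩)]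
            rw [wordAt_cons]
            cases hcc : childGet? t.children c with
            | some ch => rfl
            | none => simp [wordAt_default_getD]
          · rw [if_neg h2, if_neg hne, if_neg (by rw [List.cons_prefix_cons]; rintro ⟨-, hh⟩; exact h2 hh)]
            rw [wordAt_cons]
            cases hcc : childGet? t.children c with
            | some ch => rfl
            | none =>
              match s' with
              | [] => exact absurd (List.nil_prefix) h2
              | c'' :: s'' =>
                show wordAt (PTrie.mk (-1) PChildren.nil) (c'' :: s'') = _
                rw [wordAt_mk_cons]; simp [childGet?]
      · rw [if_neg hc]
        rw [if_neg (by intro h; injection h with h1 _; exact hc h1),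
          if_neg (by rw [List.cons_prefix_cons]; rintro ⟨h1, -⟩; exact hc h1)]
        rw [wordAt_cons]

theorem waPos_trieInsert (t : PTrie) (u : List Char) (idx : Int) (hidx : 0 ≤ idx)
    (s : List Char) :
    waPos (trieInsert t u idx) s = if s = u then some idx else waPos t s := by
  unfold waPos
  rw [wordAt_trieInsert]
  by_cases h1 : s = u
  · rw [if_pos h1, if_pos h1]; simp [hidx]
  · rw [if_neg h1, if_neg h1]
    by_cases h2 : s <+: u
    · rw [if_pos h2]
      cases hw : wordAt t s with
      | none => simp [hw]
      | some k => simp [hw]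
    · rw [if_neg h2]

theorem waPos_empty (s : List Char) : waPos (PTrie.mk (-1) PChildren.nil) s = none := by
  unfold waPos
  cases s with
  | nil => simp [wordAt_nil, PTrie.word]
  | cons c s => rw [wordAt_mk_cons]; simp [childGet?]

theorem lastVal_acc (test : String → Bool) :
    ∀ (L : List (Int × String)) (a : Option Int),
      L.foldl (fun a p => if test p.2 then some p.1 else a) a = (lastVal L test).or a := by
  intro L
  induction L with
  | nil => intro a; simp [lastVal]
  | cons p L ih =>
    intro a
    show L.foldl _ (if test p.2 then some p.1 else a) = (lastVal (p :: L) test).or a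
    rw [ih]
    show _ = ((L.foldl _ (if test p.2 then some p.1 else none)).or a)
    rw [ih (if test p.2 then some p.1 else none), Option.or_assoc]
    congr 1
    by_cases h : test p.2 <;> simp [h]

theorem lastVal_cons (test : String → Bool) (p : Int × String) (L : List (Int × String)) :
    lastVal (p :: L) test = (lastVal L test).or (if test p.2 then some p.1 else none) := by
  show L.foldl _ (if test p.2 then some p.1 else none) = _
  rw [lastVal_acc]

theorem waPos_build (L : List (Int × String)) :
    ∀ (t : PTrie) (s : List Char), (∀ p ∈ L, 0 ≤ p.1) →
      waPos (L.foldl (fun t p => trieInsert t p.2.toList p.1) t) s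
        = (lastVal L (fun wd => wd.toList == s)).or (waPos t s) := by
  induction L with
  | nil => intro t s _; simp [lastVal]
  | cons p L ih =>
    intro t s hL
    show waPos (L.foldl _ (trieInsert t p.2.toList p.1)) s = _
    rw [ih _ s (fun q hq => hL q (List.mem_cons_of_mem p hq))]
    rw [waPos_trieInsert t _ _ (hL p (List.mem_cons_self)) s]
    rw [lastVal_cons, Option.or_assoc]
    congr 1
    by_cases h : p.2.toList = s
    · simp [h]
    · have : ¬ s = p.2.toList := fun hh => h hh.symm
      simp [h, this]

theorem get?_dictBuild (L : List (Int × String)) :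
    ∀ (d : PySem.Dict String Int) (wd : String),
      (L.foldl (fun d p => d.insert p.2 p.1) d).get? wd
        = (lastVal L (fun x => x == wd)).or (d.get? wd) := by
  induction L with
  | nil => intro d wd; simp [lastVal]
  | cons p L ih =>
    intro d wd
    show (L.foldl _ (d.insert p.2 p.1)).get? wd = _
    rw [ih]
    rw [lastVal_cons, Option.or_assoc]
    congr 1
    rw [PySem.Dict.get?_insert]
    by_cases h : wd = p.2
    · simp [h]
    · have : ¬ (p.2 == wd) = true := by simp; exact fun hh => h hh.symm
      simp [h, this]

theorem lastVal_eq_some {L : List (Int × String)} {test : String → Bool} {v : Int}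
    (h : lastVal L test = some v) : ∃ p ∈ L, p.1 = v ∧ test p.2 = true := by
  induction L with
  | nil => simp [lastVal] at h
  | cons p L ih =>
    rw [lastVal_cons] at h
    cases hl : lastVal L test with
    | some v' =>
      rw [hl] at h
      simp at h
      obtain ⟨q, hq, h1, h2⟩ := ih (by rw [hl, h])
      exact ⟨q, List.mem_cons_of_mem p hq, h1, h2⟩
    | none =>
      rw [hl] at h
      simp at h
      exact ⟨p, List.mem_cons_self, h.2, h.1⟩

theorem getD_replicate_false (n k : Nat) : (List.replicate n false).getD k false = false := by
  simp [List.getD, List.getElem?_replicate]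
  split <;> rfl

theorem mem_enum {p : Int × String} {ws : List String} (h : p ∈ PySem.List.enumerate ws) :
    ∃ m : Nat, m < ws.length ∧ p = ((m : Int), ws.getD m "") := by
  rw [PySem.List.mem_enumerate_iff] at h
  obtain ⟨k, hk, rfl⟩ := h
  exact ⟨k, hk, by simp [List.getD, List.getElem?_eq_getElem hk]⟩

theorem enum_nonneg (ws : List String) : ∀ p ∈ PySem.List.enumerate ws, 0 ≤ p.1 := by
  intro p hp
  obtain ⟨m, -, rfl⟩ := mem_enum hp
  exact Int.natCast_nonneg m

theorem lastVal_congr {L : List (Int × String)} {test test' : String → Bool}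
    (h : ∀ wd, test wd = test' wd) : lastVal L test = lastVal L test' := by
  induction L with
  | nil => rfl
  | cons p L ih => rw [lastVal_cons, lastVal_cons, ih, h p.2]

theorem foldl_le_sumAcc (ws : List String) : ∀ a : Nat,
    a ≤ ws.foldl (fun a s => a + s.toList.length) a := by
  induction ws with
  | nil => intro a; exact Nat.le_refl a
  | cons wd ws ih => intro a; exact Nat.le_trans (Nat.le_add_right a _) (ih _)

theorem len_le_sumLen {ws : List String} {wd : String} (h : wd ∈ ws) :
    wd.toList.length ≤ sumLen ws := by
  unfold sumLen
  induction ws generalizing wd with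
  | nil => cases h
  | cons w0 ws ih =>
    rcases List.mem_cons.mp h with rfl | h'
    · exact Nat.le_trans (Nat.le_add_left _ _) (foldl_le_sumAcc ws _)
    · show wd.toList.length ≤ ws.foldl _ (0 + w0.toList.length)
      calc wd.toList.length ≤ ws.foldl (fun a s => a + s.toList.length) 0 := ih h'
        _ ≤ _ := by
          have : ∀ (l : List String) (a b : Nat), a ≤ b →
              l.foldl (fun a s => a + s.toList.length) a ≤ l.foldl (fun a s => a + s.toList.length) b := by
            intro l
            induction l with
            | nil => intro a b hab; exact hab
            | cons x l ihl =>
              intro a b hab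
              exact ihl (a + x.toList.length) (b + x.toList.length) (by omega)
          exact this ws 0 _ (by omega)

-- all word indices stored in the built trie are enumerate indices, hence < words.length
theorem WB_build (ws : List String) :
    WB ((PySem.List.enumerate ws).foldl (fun t p => trieInsert t p.2.toList p.1)
      (PTrie.mk (-1) PChildren.nil)) ws.length := by
  intro s k hk hk0
  have hwa : waPos ((PySem.List.enumerate ws).foldl (fun t p => trieInsert t p.2.toList p.1)
      (PTrie.mk (-1) PChildren.nil)) s = some k := by
    unfold waPos; rw [hk]; simp [hk0]
  rw [waPos_build _ _ _ (enum_nonneg ws), waPos_empty, Option.or_none] at hwa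
  obtain ⟨p, hp, h1, -⟩ := lastVal_eq_some hwa
  obtain ⟨m, hm, rfl⟩ := mem_enum hp
  simp only at h1
  omega

-- membership-restricted or-characterisation of a fold that sets found flags
theorem foldl_getD_or_mem {α : Type} (F : List Bool → α → List Bool) (P : List Bool → Prop)
    (contrib : α → Bool) (k : Nat) :
    ∀ (ms : List α) (fd : List Bool), P fd →
      (∀ fd a, a ∈ ms → P fd → P (F fd a)) →
      (∀ fd a, a ∈ ms → P fd → (F fd a).getD k false = (fd.getD k false || contrib a)) →
      (ms.foldl F fd).getD k false = (fd.getD k false || ms.any contrib) := by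
  intro ms
  induction ms with
  | nil => intro fd _ _ _; simp
  | cons a ms ih =>
    intro fd hfd hP hF
    simp only [List.foldl_cons, List.any_cons]
    rw [ih _ (hP fd a List.mem_cons_self hfd)
      (fun fd' a' ha' => hP fd' a' (List.mem_cons_of_mem a ha'))
      (fun fd' a' ha' => hF fd' a' (List.mem_cons_of_mem a ha')),
      hF fd a List.mem_cons_self hfd, Bool.or_assoc]

-- equal flags below n give equal result lists
theorem outFold_congr (ws : List String) (f f' : List Bool) :
    ∀ (l : List Nat) (acc : List String), (∀ i ∈ l, f.getD i false = f'.getD i false) →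
      l.foldl (fun acc i => if f.getD i false then acc ++ [ws.getD i ""] else acc) acc
        = l.foldl (fun acc i => if f'.getD i false then acc ++ [ws.getD i ""] else acc) acc := by
  intro l
  induction l with
  | nil => intro acc _; rfl
  | cons i l ih =>
    intro acc h
    simp only [List.foldl_cons]
    rw [h i List.mem_cons_self,
      ih _ (fun i' hi' => h i' (List.mem_cons_of_mem i hi'))]

-- contribution of starting cell (i, j) on the pristine trie
def topContrib (g : List (List Char)) (v0 : List (List Bool)) (fuel : Nat) (trie0 : PTrie)
    (k : Int) (i j : Nat) : Bool :=
  match childGet? trie0.children (gridCell g i j) with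
  | some u0 => reachT fuel g u0 k i j (visSet v0 i j true)
  | none => false

theorem cellStep (g : List (List Char)) (v0 : List (List Bool)) (fuel : Nat) {trie0 : PTrie}
    {n : Nat} (hWB : WB trie0 n) (i j : Nat) (st : PTrie × List Bool)
    (h1 : st.2.length = n) (h2 : TrieR st.2 st.1 trie0) :
    let st' := scanCell g v0 fuel st i j
    st'.2.length = n ∧ TrieR st'.2 st'.1 trie0 ∧ ∀ k : Int, 0 ≤ k →
      st'.2.getD k.toNat false
        = (st.2.getD k.toNat false || topContrib g v0 fuel trie0 k i j) := by
  unfold scanCell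
  cases hc : childGet? st.1.children (gridCell g (↑i) (↑j)) with
  | none =>
    have hc0 := TrieR_child_none h2 _ hc
    refine ⟨h1, h2, fun k hk => ?_⟩
    unfold topContrib
    rw [hc0]
    simp
  | some child =>
    obtain ⟨u0, hc0, hcR⟩ := TrieR_child h2 _ hc
    have hWBu := WB_child hWB hc0
    have hrec := dfsA_eq fuel g i j (visSet v0 i j true) hcR h1 hWBu
    refine ⟨?_, ?_, fun k hk => ?_⟩
    · simp only
      rw [hrec.1, dfsP_len]; exact h1
    · simp only
      rw [hrec.1]
      exact TrieR_update
        (TrieR_mono (fun m hm => dfsP_mono fuel g i j _ u0 st.2 m hm) h2) hc hc0 hrec.2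
    · simp only
      rw [hrec.1, dfsP_getD fuel g i j _ k hWBu h1 hk]
      unfold topContrib
      rw [hc0]

theorem rowFold (g : List (List Char)) (v0 : List (List Bool)) (fuel : Nat) {trie0 : PTrie}
    {n : Nat} (hWB : WB trie0 n) (i : Nat) :
    ∀ (js : List Nat) (st : PTrie × List Bool), st.2.length = n → TrieR st.2 st.1 trie0 →
      let st' := js.foldl (fun (st : PTrie × List Bool) j => scanCell g v0 fuel st i j) st
      st'.2.length = n ∧ TrieR st'.2 st'.1 trie0 ∧ ∀ k : Int, 0 ≤ k →
        st'.2.getD k.toNat false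
          = (st.2.getD k.toNat false || js.any (fun j => topContrib g v0 fuel trie0 k i j)) := by
  intro js
  induction js with
  | nil => intro st h1 h2; exact ⟨h1, h2, fun k _ => by simp⟩
  | cons j js ih =>
    intro st h1 h2
    simp only [List.foldl_cons]
    obtain ⟨c1, c2, c3⟩ := cellStep g v0 fuel hWB i j st h1 h2
    obtain ⟨d1, d2, d3⟩ := ih _ c1 c2
    refine ⟨d1, d2, fun k hk => ?_⟩
    rw [d3 k hk, c3 k hk, List.any_cons, Bool.or_assoc]

theorem gridFold (g : List (List Char)) (v0 : List (List Bool)) (fuel : Nat) {trie0 : PTrie}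
    {n : Nat} (hWB : WB trie0 n) (w : Nat) :
    ∀ (is : List Nat) (st : PTrie × List Bool), st.2.length = n → TrieR st.2 st.1 trie0 →
      let st' := is.foldl (fun st i => (List.range w).foldl
        (fun (st : PTrie × List Bool) j => scanCell g v0 fuel st i j) st) st
      st'.2.length = n ∧ ∀ k : Int, 0 ≤ k →
        st'.2.getD k.toNat false
          = (st.2.getD k.toNat false ||
              is.any (fun i => (List.range w).any (fun j => topContrib g v0 fuel trie0 k i j))) := by
  intro is
  induction is with
  | nil => intro st h1 h2; exact ⟨h1, fun k _ => by simp⟩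
  | cons i is ih =>
    intro st h1 h2
    simp only [List.foldl_cons]
    obtain ⟨c1, c2, c3⟩ := rowFold g v0 fuel hWB i (List.range w) st h1 h2
    obtain ⟨d1, d3⟩ := ih _ c1 c2
    refine ⟨d1, fun k hk => ?_⟩
    rw [d3 k hk, c3 k hk, List.any_cons, Bool.or_assoc]

-- B's found array after the items loop
theorem foundB_getD (g : List (List Char)) (h w : Int) (items : List (String × Int))
    (n : Nat) (k : Nat) (fd0 : List Bool) (hlen : fd0.length = n)
    (hidx : ∀ p ∈ items, 0 ≤ p.2 ∧ p.2 < (n : Int)) :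
    (items.foldl (fun (fd : List Bool) p =>
        if existsPathB g h w p.1 then fd.set p.2.toNat true else fd) fd0).getD k false
      = (fd0.getD k false || items.any (fun p => existsPathB g h w p.1 && (p.2.toNat == k))) := by
  apply foldl_getD_or_mem _ (fun fd => fd.length = n) _ k items fd0 hlen
  · intro fd p hp hfd
    dsimp only
    split
    · rw [List.length_set]; exact hfd
    · exact hfd
  · intro fd p hp hfd
    dsimp only
    by_cases he : existsPathB g h w p.1
    · rw [if_pos he, he]
      by_cases hkk : p.2.toNat = k
      · rw [hkk, getD_set_true_self _ _ (by obtain ⟨hp1, hp2⟩ := hidx p hp; omega)]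
        simp [hkk]
      · rw [getD_set_true_ne _ _ _ (fun hh => hkk hh.symm)]
        simp [hkk]
    · rw [if_neg he]
      simp [he]

theorem waPos_some {t : PTrie} {s : List Char} {k : Int} (h : waPos t s = some k) :
    wordAt t s = some k ∧ 0 ≤ k := by
  unfold waPos at h
  cases hw : wordAt t s with
  | none => rw [hw] at h; dsimp only at h; exact absurd h (by simp)
  | some k' =>
    rw [hw] at h
    dsimp only at h
    split_ifs at h with h0
    obtain rfl : k' = k := by injection h
    exact ⟨rfl, h0⟩

theorem getD_mem_of_lt {ws : List String} {k : Nat} (h : k < ws.length) : ws.getD k "" ∈ ws := by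
  rw [List.getD, List.getElem?_eq_getElem h]
  exact List.getElem_mem h

theorem toList_test_congr {wd : String} {l : List Char} (hwl : wd.toList = l) (x : String) :
    (x.toList == l) = (x == wd) := by
  by_cases hx : x = wd
  · subst hx; simp [hwl]
  · have h1 : ¬ x.toList = l := by
      rw [← hwl]; intro hh; exact hx (String.toList_inj.mp hh)
    simp [hx, h1]

theorem pointwise_eq (matrix words : List String) (k : Nat) (hk : k < words.length)
    (g : List (List Char)) (hg : g = matrix.map String.toList)
    (trie0 : PTrie) (htrie : trie0 = (PySem.List.enumerate words).foldl
      (fun t p => trieInsert t p.2.toList p.1) (PTrie.mk (-1) PChildren.nil))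
    (v0 : List (List Bool)) (hv0 : v0 = List.replicate matrix.length
      (List.replicate (g.headD []).length false))
    (d : PySem.Dict String Int) (hd : d = (PySem.List.enumerate words).foldl
      (fun (d : PySem.Dict String Int) p => d.insert p.2 p.1) PySem.Dict.empty) :
    (List.range matrix.length).any (fun i => (List.range (g.headD []).length).any (fun j =>
        topContrib g v0 (sumLen words + 1) trie0 (k : Int) i j))
      = d.items.any (fun p => existsPathB g (matrix.length : Int) ((g.headD []).length : Int) p.1
          && (p.2.toNat == k)) := by
  have hnd : d.keys.Nodup := by
    rw [hd]
    exact PySem.Dict.nodup_keys_foldl_insert_key _ Prod.snd (fun d p => p.1)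
      PySem.Dict.empty PySem.Dict.nodup_keys_empty
  have hlen : (g.length : Int) = (matrix.length : Int) := by rw [hg]; simp
  have hveq : List.replicate ((matrix.length : Int)).toNat
      (List.replicate (((g.headD []).length : Int)).toNat false) = v0 := by
    rw [hv0]; simp
  apply Bool.coe_iff_coe.mp
  simp only [List.any_eq_true, List.mem_range, Bool.and_eq_true, beq_iff_eq]
  constructor
  · rintro ⟨i, hi, j, hj, htop⟩
    unfold topContrib at htop
    cases hc0 : childGet? trie0.children (gridCell g (↑i) (↑j)) with
    | none => rw [hc0] at htop; simp at htop
    | some u0 =>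
      rw [hc0] at htop
      obtain ⟨s, hslen, hword, hpath⟩ := (reachT_iff _ g u0 (k : Int) _ _ _).mp htop
      have hfull : wordAt trie0 (gridCell g (↑i) (↑j) :: s) = some (k : Int) := by
        rw [wordAt_cons, hc0]; exact hword
      have hwa : waPos trie0 (gridCell g (↑i) (↑j) :: s) = some (k : Int) := by
        unfold waPos; rw [hfull]; simp
      rw [htrie, waPos_build _ _ _ (enum_nonneg words), waPos_empty, Option.or_none] at hwa
      obtain ⟨p, hpE, hp1, hp2⟩ := lastVal_eq_some hwa
      obtain ⟨m, hm, rfl⟩ := mem_enum hpE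
      have hmk : m = k := by simp only at hp1; omega
      subst hmk
      have hu : (words.getD m "").toList = gridCell g (↑i) (↑j) :: s := by
        simpa using hp2
      have hlast : lastVal (PySem.List.enumerate words) (fun x => x == words.getD m "")
          = some (m : Int) := by
        rw [← hwa]
        exact (lastVal_congr (fun x => toList_test_congr hu x)).symm
      have hget : d.get? (words.getD m "") = some (m : Int) := by
        rw [hd, get?_dictBuild, PySem.Dict.get?_empty, Option.or_none, hlast]
      refine ⟨(words.getD m "", (m : Int)), PySem.Dict.mem_items_of_get?_eq_some d hget, ?_, by simp⟩
      unfold existsPathB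
      rw [if_neg (by rw [hu]; simp)]
      simp only [List.any_eq_true, List.mem_range]
      refine ⟨i, by simpa using hi, j, by simpa using hj, ?_⟩
      rw [hveq, hu]
      exact (dfsB_iff g _ _ hlen.symm rfl s (gridCell g (↑i) (↑j)) (↑i) (↑j) v0
        (Int.natCast_nonneg i)).mpr ⟨rfl, hpath⟩
  · rintro ⟨p, hpI, hpB, hpk⟩
    have hget : d.get? p.1 = some p.2 := by
      obtain ⟨k1, v1⟩ := p
      exact PySem.Dict.get?_of_mem_items d (h := hpI) hnd
    rw [hd, get?_dictBuild, PySem.Dict.get?_empty, Option.or_none] at hget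
    obtain ⟨q, hqE, hq1, hq2⟩ := lastVal_eq_some hget
    obtain ⟨m, hm, rfl⟩ := mem_enum hqE
    simp only at hq1 hq2
    have hp2 : p.2 = (m : Int) := hq1.symm
    have hmk : m = k := by omega
    subst hmk
    have hp1 : p.1 = words.getD m "" := (beq_iff_eq.mp hq2).symm
    rw [hp1] at hpB
    rw [hp1, ← hq1] at hget
    unfold existsPathB at hpB
    cases hwl : (words.getD m "").toList with
    | nil => rw [if_pos (by rw [hwl])] at hpB; simp at hpB
    | cons c s =>
      rw [if_neg (by rw [hwl]; simp)] at hpB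
      simp only [List.any_eq_true, List.mem_range] at hpB
      obtain ⟨i, hi, j, hj, hdfs⟩ := hpB
      rw [hveq, hwl] at hdfs
      obtain ⟨hcell, hpath⟩ := (dfsB_iff g _ _ hlen.symm rfl s c (↑i) (↑j) v0
        (Int.natCast_nonneg i)).mp hdfs
      -- recover the trie-side facts
      have hlast : lastVal (PySem.List.enumerate words) (fun x => x.toList == c :: s)
          = some (m : Int) := by
        rw [lastVal_congr (fun x => toList_test_congr hwl x)]
        exact hget
      have hwa : waPos trie0 (c :: s) = some (m : Int) := by
        rw [htrie, waPos_build _ _ _ (enum_nonneg words), waPos_empty, Option.or_none]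
        exact hlast
      obtain ⟨hfull, -⟩ := waPos_some hwa
      rw [wordAt_cons] at hfull
      cases hc0 : childGet? trie0.children c with
      | none => rw [hc0] at hfull; simp at hfull
      | some u0 =>
        rw [hc0] at hfull
        refine ⟨i, by simpa using hi, j, by simpa using hj, ?_⟩
        unfold topContrib
        rw [← hcell] at hc0
        rw [hc0]
        apply (reachT_iff _ g u0 (m : Int) _ _ _).mpr
        refine ⟨s, ?_, hfull, hpath⟩
        have hmem : words.getD m "" ∈ words := getD_mem_of_lt hm
        have hsum := len_le_sumLen hmem
        rw [hwl] at hsum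
        simp at hsum
        omega

theorem ports_eq (matrix words : List String) :
    word_search_ii matrix words = word_search_ii_alt matrix words := by
  unfold word_search_ii word_search_ii_alt
  dsimp only
  set g := List.map String.toList matrix with hg
  set trie0 := List.foldl (fun t p => trieInsert t p.2.toList p.1) (PTrie.mk (-1) PChildren.nil)
      (PySem.List.enumerate words) with htrie
  set v0 := List.replicate matrix.length (List.replicate (g.headD []).length false) with hv0
  set d := List.foldl (fun (d : PySem.Dict String Int) p => d.insert p.2 p.1) PySem.Dict.empty
      (PySem.List.enumerate words) with hd
  set stA := List.foldl
      (fun st i => List.foldl (fun st j => scanCell g v0 (sumLen words + 1) st i j) st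
        (List.range (g.headD []).length))
      (trie0, List.replicate words.length false) (List.range matrix.length) with hstA
  set fB := List.foldl
      (fun fd p => if existsPathB g (↑matrix.length) (↑(g.headD []).length) p.1
        then fd.set p.2.toNat true else fd)
      (List.replicate words.length false) d.items with hfB
  have hWB : WB trie0 words.length := by rw [htrie]; exact WB_build words
  have hnd : d.keys.Nodup := by
    rw [hd]
    exact PySem.Dict.nodup_keys_foldl_insert_key _ Prod.snd (fun d p => p.1)
      PySem.Dict.empty PySem.Dict.nodup_keys_empty
  obtain ⟨hlenA, hA⟩ := gridFold g v0 (sumLen words + 1) hWB (g.headD []).length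
    (List.range matrix.length) (trie0, List.replicate words.length false)
    (by simp) (TrieR_refl _ _)
  rw [← hstA] at hlenA hA
  have hidx : ∀ p ∈ d.items, 0 ≤ p.2 ∧ p.2 < (words.length : Int) := by
    intro p hp
    have hget : d.get? p.1 = some p.2 := PySem.Dict.get?_of_mem_items d (h := hp) hnd
    rw [hd, get?_dictBuild, PySem.Dict.get?_empty, Option.or_none] at hget
    obtain ⟨q, hqE, hq1, -⟩ := lastVal_eq_some hget
    obtain ⟨m, hm, rfl⟩ := mem_enum hqE
    simp only at hq1
    omega
  have hlenB : fB.length = words.length := by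
    rw [hfB]
    have := foldl_pres
      (fun (fd : List Bool) (p : String × Int) =>
        if existsPathB g (↑matrix.length) (↑(g.headD []).length) p.1
          then fd.set p.2.toNat true else fd)
      (fun fd => fd.length = words.length)
      (by
        intro fd p hfd
        dsimp only
        split
        · rw [List.length_set]; exact hfd
        · exact hfd)
      d.items (List.replicate words.length false) (by simp)
    exact this
  rw [hlenA, hlenB]
  apply outFold_congr
  intro i hi
  have hi' : i < words.length := List.mem_range.mp hi
  have hiN : ((i : Int)).toNat = i := Int.toNat_natCast i
  have hAi := hA (i : Int) (Int.natCast_nonneg i)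
  rw [hiN] at hAi
  have hBi := foundB_getD g (↑matrix.length) (↑(g.headD []).length) d.items words.length i
    (List.replicate words.length false) (by simp) hidx
  rw [← hfB] at hBi
  rw [hAi, hBi]
  simp only [getD_replicate_false, Bool.false_or]
  exact pointwise_eq matrix words i hi' g hg trie0 htrie v0 hv0 d hd

-- ===== VERDICT (by name: the statement is the Claim_ definition above) =====
theorem word_search_ii_spec : Claim_equal_word_search_ii := by
  intro matrix words _ _
  unfold Spec_word_search_ii
  exact ports_eq matrix words
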